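-- pv_equiv track=rewrite | github.com/UALR-ACM/Practice-Problems | 2015-09-28/knight-coins.py | getRich
-- ===== SOURCE A (Python) =====
-- def getRich(n):
-- 	days = list(range(n))
-- 	pay, days_until_pay_increase = 1, 1
-- 	total = 0
-- 	for day in days:
-- 		total += pay
-- 		days_until_pay_increase -= 1
-- 		if days_until_pay_increase == 0:
-- 			pay += 1
-- 			days_until_pay_increase = pay
-- 	return total
-- ===== SOURCE B (Python) =====
-- def getRich(n):
--     # Closed form: pay k is earned on k consecutive days; find the last
--     # completed block m (largest m with m*(m+1)/2 <= n), then
--     # total = 1^2 + 2^2 + ... + m^2  +  (remaining days) * (m+1).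
--     if n <= 0:
--         return 0
--     m = 0
--     while (m + 1) * (m + 2) <= 2 * n:
--         m += 1
--     return m * (m + 1) * (2 * m + 1) // 6 + (n - m * (m + 1) // 2) * (m + 1)
-- ===== Notes on version B (the rewrite author's own statement) =====
-- stated objective: faster
-- what changed: Replaces the O(n) day-by-day accumulation loop with a closed form: find the last completed pay block via triangular numbers (O(sqrt n) scan) and use the sum-of-squares formula plus the partial block.
import Mathlib
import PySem

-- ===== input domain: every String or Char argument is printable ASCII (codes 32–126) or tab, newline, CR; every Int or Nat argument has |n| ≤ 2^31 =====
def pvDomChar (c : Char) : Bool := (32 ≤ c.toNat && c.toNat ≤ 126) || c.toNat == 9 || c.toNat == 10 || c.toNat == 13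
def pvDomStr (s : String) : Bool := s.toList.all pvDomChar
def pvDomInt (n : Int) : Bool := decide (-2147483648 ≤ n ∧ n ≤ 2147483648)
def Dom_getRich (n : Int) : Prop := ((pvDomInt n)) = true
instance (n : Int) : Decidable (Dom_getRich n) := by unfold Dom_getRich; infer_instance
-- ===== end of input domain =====

-- B replaces A's day-by-day accumulation loop by a closed form (triangular-number
-- block search plus the sum-of-squares formula); objective: faster.

-- ===== PORT A =====
-- literal transliteration of A: fold over list(range(n)) with state (pay, days_until_pay_increase, total)
def getRich (n : Int) : Int :=
  let days := PySem.List.pyRange 0 n 1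
  let st := days.foldl
    (fun (st : Int × Int × Int) (_day : Int) =>
      let pay := st.1
      let dupi := st.2.1
      let total := st.2.2
      let total := total + pay
      let dupi := dupi - 1
      if dupi = 0 then (pay + 1, pay + 1, total) else (pay, dupi, total))
    (1, 1, 0)
  st.2.2

-- ===== PORT B =====
-- the while-loop of Source B: exit point of 'while (m+1)*(m+2) <= 2*n: m += 1'
def getRichFindM (n m : Int) : Int :=
  if (m + 1) * (m + 2) ≤ 2 * n then getRichFindM n (m + 1) else m
termination_by (n - m).toNat
decreasing_by
  have hmn : m < n := by nlinarith [sq_nonneg (m + 1), mul_self_nonneg (m + 1)]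
  omega

def getRich_alt (n : Int) : Int :=
  if n ≤ 0 then 0
  else
    let m := getRichFindM n 0
    PySem.Int.floordiv (m * (m + 1) * (2 * m + 1)) 6 +
      (n - PySem.Int.floordiv (m * (m + 1)) 2) * (m + 1)

-- ===== PRECONDITION & SPEC =====
def Spec_getRich (n : Int) (out : Int) : Prop := out = getRich_alt n
instance (n : Int) (out : Int) : Decidable (Spec_getRich n out) := by unfold Spec_getRich; infer_instance

-- ===== CLAIM (what is proved, stated in full; the proofs are below) =====
def Claim_equal_getRich : Prop := ∀ (n : Int), Dom_getRich n → Spec_getRich n (getRich n)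

-- ===== LEMMAS AND PROOFS =====

-- A's loop body (element-independent)
def pvBody (st : Int × Int × Int) : Int × Int × Int :=
  let pay := st.1
  let dupi := st.2.1
  let total := st.2.2
  let total := total + pay
  let dupi := dupi - 1
  if dupi = 0 then (pay + 1, pay + 1, total) else (pay, dupi, total)

-- triangular numbers and sums of squares (Nat)
def pvT (m : Nat) : Nat := m * (m + 1) / 2
def pvSq : Nat → Nat
  | 0 => 0
  | m + 1 => pvSq m + (m + 1) * (m + 1)

lemma pvT_two_mul (m : Nat) : 2 * pvT m = m * (m + 1) := by
  have hdvd : 2 ∣ m * (m + 1) := (Nat.even_mul_succ_self m).two_dvd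
  exact Nat.mul_div_cancel' hdvd

lemma pvT_succ (m : Nat) : pvT (m + 1) = pvT m + (m + 1) := by
  have h1 := pvT_two_mul m
  have h2 := pvT_two_mul (m + 1)
  have h3 : (m + 1) * (m + 1 + 1) = m * (m + 1) + 2 * (m + 1) := by ring
  omega

lemma pvSq_six (m : Nat) : 6 * pvSq m = m * (m + 1) * (2 * m + 1) := by
  induction m with
  | zero => rfl
  | succ k ih => simp only [pvSq]; ring_nf; ring_nf at ih; omega

-- fold with an element-independent body = iterate
lemma foldl_const_body (l : List Int) (st : Int × Int × Int) :
    l.foldl (fun s (_ : Int) => pvBody s) st = pvBody^[l.length] st := by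
  induction l generalizing st with
  | nil => rfl
  | cons a t ih => simp [List.foldl, ih, Function.iterate_succ_apply]

lemma getRich_eq_iter (n : Int) : getRich n = (pvBody^[n.toNat] (1, 1, 0)).2.2 := by
  show ((PySem.List.pyRange 0 n 1).foldl (fun s (_ : Int) => pvBody s) (1, 1, 0)).2.2 = _
  rw [foldl_const_body, PySem.List.length_pyRange_one]
  norm_num

-- loop invariant: after d days the state is
-- (m+1, T(m+1)-d, Sq m + (d - T m)*(m+1)) where m counts completed pay blocks
lemma pvInvariant (d : Nat) :
    ∃ m : Nat, pvT m ≤ d ∧ d < pvT (m + 1) ∧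
      pvBody^[d] (1, 1, 0) =
        ((m : Int) + 1, (pvT (m + 1) : Int) - d,
          (pvSq m : Int) + ((d : Int) - pvT m) * ((m : Int) + 1)) := by
  induction d with
  | zero =>
    refine ⟨0, by simp [pvT], by simp [pvT], ?_⟩
    simp [pvT, pvSq]
  | succ k ih =>
    obtain ⟨m, h1, h2, hst⟩ := ih
    rw [Function.iterate_succ_apply', hst]
    have hT' : (pvT (m + 1) : Int) = (pvT m : Int) + ((m : Int) + 1) := by
      have := pvT_succ m; push_cast [this]; ring
    by_cases hb : k + 1 = pvT (m + 1)
    · -- day k+1 completes block m+1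
      have hbZ : (k : Int) + 1 = (pvT (m + 1) : Int) := by exact_mod_cast hb
      refine ⟨m + 1, by omega, by rw [pvT_succ (m + 1)]; omega, ?_⟩
      simp only [pvBody]
      rw [if_pos (by omega)]
      have hT'' : (pvT (m + 1 + 1) : Int) = (pvT (m + 1) : Int) + ((m : Int) + 2) := by
        have := pvT_succ (m + 1); push_cast [this]; ring
      have hS : (pvSq (m + 1) : Int) = (pvSq m : Int) + ((m : Int) + 1) * ((m : Int) + 1) := by
        simp only [pvSq]; push_cast; ring
      refine Prod.ext (by push_cast; ring) (Prod.ext (by push_cast; omega) ?_)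
      simp only []
      push_cast
      have hd : (k : Int) - (pvT m : Int) = (m : Int) := by omega
      push_cast at hS ⊢
      nlinarith [hd, hS, hbZ]
    · -- middle of block m
      have hbZ : (k : Int) + 1 ≠ (pvT (m + 1) : Int) := by
        intro h; exact hb (by exact_mod_cast h)
      refine ⟨m, by omega, by omega, ?_⟩
      simp only [pvBody]
      rw [if_neg (by intro h; apply hbZ; omega)]
      refine Prod.ext rfl (Prod.ext (by push_cast; ring) (by push_cast; ring))

-- the while-loop's exit point satisfies the block characterisation
lemma findM_spec (n m : Int) : 0 ≤ m → m * (m + 1) ≤ 2 * n →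
    0 ≤ getRichFindM n m ∧ getRichFindM n m * (getRichFindM n m + 1) ≤ 2 * n ∧
      2 * n < (getRichFindM n m + 1) * (getRichFindM n m + 2) := by
  induction m using getRichFindM.induct (n := n) with
  | case1 m hcond ih =>
    intro hm _
    rw [getRichFindM, if_pos hcond]
    exact ih (by omega) (by nlinarith)
  | case2 m hcond =>
    intro hm hT
    rw [getRichFindM, if_neg hcond]
    exact ⟨hm, hT, by omega⟩

-- uniqueness of the block index
lemma block_unique (a b n : Int) (ha0 : 0 ≤ a) (hb0 : 0 ≤ b)
    (ha : a * (a + 1) ≤ 2 * n) (ha2 : 2 * n < (a + 1) * (a + 2))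
    (hb : b * (b + 1) ≤ 2 * n) (hb2 : 2 * n < (b + 1) * (b + 2)) : a = b := by
  by_contra hne
  rcases lt_or_gt_of_ne hne with h | h
  · nlinarith
  · nlinarith

-- ===== VERDICT (by name: the statement is the Claim_ definition above) =====
theorem getRich_spec : Claim_equal_getRich := by
  intro n _
  show getRich n = getRich_alt n
  rw [getRich_eq_iter]
  by_cases hn : n ≤ 0
  · have h0 : n.toNat = 0 := by omega
    rw [getRich_alt, if_pos hn, h0]
    rfl
  · obtain ⟨m, h1, h2, hst⟩ := pvInvariant n.toNat
    rw [hst, getRich_alt, if_neg hn]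
    have hnn : ((n.toNat : Int)) = n := by omega
    obtain ⟨hr0, hr1, hr2⟩ := findM_spec n 0 le_rfl (by omega)
    have hTm : ((m : Int)) * ((m : Int) + 1) = 2 * (pvT m : Int) := by
      exact_mod_cast (pvT_two_mul m).symm
    have hTm1 : ((m : Int) + 1) * ((m : Int) + 2) = 2 * (pvT (m + 1) : Int) := by
      have h : ((m : Int) + 1) * (((m : Int) + 1) + 1) = 2 * ((pvT (m + 1) : Nat) : Int) := by
        exact_mod_cast (pvT_two_mul (m + 1)).symm
      linear_combination h
    have hmc1 : (m : Int) * ((m : Int) + 1) ≤ 2 * n := by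
      have : (pvT m : Int) ≤ n := by omega
      omega
    have hmc2 : 2 * n < ((m : Int) + 1) * ((m : Int) + 2) := by
      have : n < (pvT (m + 1) : Int) := by omega
      omega
    have hrm : getRichFindM n 0 = (m : Int) :=
      block_unique _ _ n hr0 (by positivity) hr1 hr2 hmc1 hmc2
    simp only [hrm]
    have hf2 : PySem.Int.floordiv ((m : Int) * ((m : Int) + 1)) 2 = (pvT m : Int) := by
      rw [PySem.Int.floordiv_eq_ediv_of_pos (by norm_num), hTm]
      exact Int.mul_ediv_cancel_left _ (by norm_num)
    have hf6 : PySem.Int.floordiv ((m : Int) * ((m : Int) + 1) * (2 * (m : Int) + 1)) 6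
        = (pvSq m : Int) := by
      rw [PySem.Int.floordiv_eq_ediv_of_pos (by norm_num)]
      have h6 : ((m : Int)) * ((m : Int) + 1) * (2 * (m : Int) + 1) = 6 * (pvSq m : Int) := by
        have h : ((m : Int)) * ((m : Int) + 1) * (2 * (m : Int) + 1) = 6 * ((pvSq m : Nat) : Int) := by
          exact_mod_cast (pvSq_six m).symm
        linear_combination h
      rw [h6]
      exact Int.mul_ediv_cancel_left _ (by norm_num)
    rw [hf2, hf6, hnn]
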